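-- pv_equiv track=rewrite | github.com/pypi-data/pypi-mirror-390 | packages/ymvas/ymvas-1.2.3.tar.gz/ymvas-1.2.3/ymvas/models/arguments.py | keyv
-- ===== SOURCE A (Python) =====
-- def keyv(args,short_key,key,default=None):
--     trash, value, found = [], default, False
--     for i, c in enumerate(args):
--         if (c.startswith(key) or c.startswith(short_key)) and not found:
--             found = True
--             value = c.split('=')[0]
--             value = c.replace(value + '=',"")
--             if len(value) > 2 and value[0] == value[-1] and value[0] in ["'",'"']:
--                 value = value.strip(value[0])
--         else:
--             trash.append(c)
--     return trash, value
-- ===== SOURCE B (Python) =====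
-- def keyv(args, short_key, key, default=None):
--     args = list(args)
--     i = next((j for j, c in enumerate(args)
--               if c.startswith(key) or c.startswith(short_key)), None)
--     if i is None:
--         return args, default
--     c = args[i]
--     value = c.split('=')[0]
--     value = c.replace(value + '=', "")
--     if len(value) > 2 and value[0] == value[-1] and value[0] in ["'", '"']:
--         value = value.strip(value[0])
--     return args[:i] + args[i+1:], value
-- ===== Notes on version B (the rewrite author's own statement) =====
-- stated objective: simpler
-- what changed: Replaces the single accumulating pass with a 'found' flag by a two-phase decomposition: find the index of the first matching arg with next()/enumerate, then build the rest via two slices and parse the value from the matched element with the same split/replace/quote-strip block.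
import Mathlib
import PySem

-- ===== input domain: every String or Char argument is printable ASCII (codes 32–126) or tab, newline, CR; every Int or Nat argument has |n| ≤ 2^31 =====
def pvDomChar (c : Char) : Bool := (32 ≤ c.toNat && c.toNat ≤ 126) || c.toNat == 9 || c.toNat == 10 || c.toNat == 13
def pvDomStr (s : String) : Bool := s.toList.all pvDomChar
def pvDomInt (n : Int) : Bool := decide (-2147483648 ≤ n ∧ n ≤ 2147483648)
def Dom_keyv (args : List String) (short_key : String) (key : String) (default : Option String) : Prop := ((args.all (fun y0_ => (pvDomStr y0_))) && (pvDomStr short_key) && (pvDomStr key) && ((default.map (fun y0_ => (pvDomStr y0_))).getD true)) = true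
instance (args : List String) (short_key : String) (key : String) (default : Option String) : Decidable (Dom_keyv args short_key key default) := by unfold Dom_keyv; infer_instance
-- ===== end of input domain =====

-- B replaces A's single accumulating pass with a 'found' flag by a find-the-index-then-slice decomposition (objective: simpler).


-- The value-parsing block, identical character for character in both Python sources:
-- value = c.split('=')[0]; value = c.replace(value + '=', ""); then strip a matching outer quote.
def pvParse (c : String) : String :=
  let v0 := ((PySem.Str.split? c "=").getD []).headD ""   -- c.split('=')[0]; split? is some for sep "="; split never returns []
  let v := PySem.Str.replace c (v0 ++ "=") ""
  if 2 < PySem.Str.len v then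
    match PySem.Str.pyGet? v 0, PySem.Str.pyGet? v (-1) with
    | some a, some b =>
        if a = b ∧ (a = '\'' ∨ a = '"') then PySem.Str.stripChars v (String.ofList [a]) else v
    | _, _ => v
  else v

-- ===== PORT A =====
-- one fold over args carrying (trash, value, found)
def pvStep (short_key key : String) (st : List String × Option String × Bool) (c : String) : List String × Option String × Bool :=
  if (PySem.Str.startswith c key || PySem.Str.startswith c short_key) && !st.2.2 then
    (st.1, some (pvParse c), true)
  else
    (st.1 ++ [c], st.2.1, st.2.2)

def keyv (args : List String) (short_key : String) (key : String) (default : Option String) : List String × Option String :=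
  let r := args.foldl (pvStep short_key key) ([], default, false)
  (r.1, r.2.1)

-- ===== PORT B =====
-- find the index of the first matching arg, then two slices around it
def keyv_alt (args : List String) (short_key : String) (key : String) (default : Option String) : List String × Option String :=
  match args.findIdx? (fun c => PySem.Str.startswith c key || PySem.Str.startswith c short_key) with
  | none => (args, default)
  | some i => (args.take i ++ args.drop (i + 1), some (pvParse (args.getD i "")))

-- ===== PRECONDITION & SPEC =====
def Spec_keyv (args : List String) (short_key : String) (key : String) (default : Option String) (out : List String × Option String) : Prop := out = keyv_alt args short_key key default
instance (args : List String) (short_key : String) (key : String) (default : Option String) (out : List String × Option String) : Decidable (Spec_keyv args short_key key default out) := by unfold Spec_keyv; infer_instance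

-- ===== CLAIM (what is proved, stated in full; the proofs are below) =====
def Claim_equal_keyv : Prop := ∀ (args : List String) (short_key : String) (key : String) (default : Option String), Dom_keyv args short_key key default → Spec_keyv args short_key key default (keyv args short_key key default)

-- ===== LEMMAS AND PROOFS =====

-- once found, every later step only appends to trash
theorem pvFoldl_found (short_key key : String) (as : List String) (t : List String) (v : Option String) :
    as.foldl (pvStep short_key key) (t, v, true) = (t ++ as, v, true) := by
  induction as generalizing t with
  | nil => simp
  | cons a as ih => simp [List.foldl, pvStep, ih]

-- the not-yet-found loop equals find-index-then-slice
theorem pvFoldl_eq (short_key key : String) (as : List String) (t : List String) (d : Option String) :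
    as.foldl (pvStep short_key key) (t, d, false) =
      match as.findIdx? (fun c => PySem.Str.startswith c key || PySem.Str.startswith c short_key) with
      | none => (t ++ as, d, false)
      | some i => (t ++ (as.take i ++ as.drop (i + 1)), some (pvParse (as.getD i "")), true) := by
  induction as generalizing t with
  | nil => simp
  | cons a as ih =>
    by_cases h : (PySem.Str.startswith a key || PySem.Str.startswith a short_key) = true
    · simp only [Bool.or_eq_true, PySem.Str.startswith_eq] at h
      simp [List.foldl, pvStep, List.findIdx?_cons, h, pvFoldl_found]
    · have h' : (PySem.Str.startswith a key || PySem.Str.startswith a short_key) = false := by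
        simpa using h
      have h2 : PySem.Chars.startswith a.toList key.toList = false ∧
          PySem.Chars.startswith a.toList short_key.toList = false := by simpa using h
      rw [List.foldl_cons, show pvStep short_key key (t, d, false) a = (t ++ [a], d, false) by
        simp [pvStep, h2.1, h2.2], ih]
      simp only [List.findIdx?_cons]
      rw [h']
      simp only [Bool.false_eq_true, if_false]
      cases hfi : List.findIdx? (fun c => PySem.Str.startswith c key || PySem.Str.startswith c short_key) as with
      | none => simp
      | some i => simp [List.getD]

-- ===== VERDICT (by name: the statement is the Claim_ definition above) =====
theorem keyv_spec : Claim_equal_keyv := by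
  intro args short_key key default _
  unfold Spec_keyv keyv keyv_alt
  rw [pvFoldl_eq]
  cases hfi : args.findIdx? (fun c => PySem.Str.startswith c key || PySem.Str.startswith c short_key) <;> simp
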